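-- pv_equiv track=rewrite | github.com/aamelegy/Problems | acmicpc/level1/phase2/SRM521DivII250.py | minPaints
-- ===== SOURCE A (Python) =====
-- def minPaints(row):
--     r=row.count('R')
--     g=len(row)-r
--     mn=min(g,r)
--     g=0
--     for i in range(len(row)):
--         if row[i]=='G':
--             g+=1
--         elif row[i]=='R':
--             r-=1
--         mn=min(g+r,mn)
--     return mn
-- ===== SOURCE B (Python) =====
-- def minPaints(row):
--     return min(row[:k].count('G') + row[k:].count('R') for k in range(len(row) + 1))
-- ===== Notes on version B (the rewrite author's own statement) =====
-- stated objective: simpler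
-- what changed: Replaces the incremental loop over running G/R accumulators by a direct one-line minimum of prefix-G + suffix-R counts over all split points.
import Mathlib
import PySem

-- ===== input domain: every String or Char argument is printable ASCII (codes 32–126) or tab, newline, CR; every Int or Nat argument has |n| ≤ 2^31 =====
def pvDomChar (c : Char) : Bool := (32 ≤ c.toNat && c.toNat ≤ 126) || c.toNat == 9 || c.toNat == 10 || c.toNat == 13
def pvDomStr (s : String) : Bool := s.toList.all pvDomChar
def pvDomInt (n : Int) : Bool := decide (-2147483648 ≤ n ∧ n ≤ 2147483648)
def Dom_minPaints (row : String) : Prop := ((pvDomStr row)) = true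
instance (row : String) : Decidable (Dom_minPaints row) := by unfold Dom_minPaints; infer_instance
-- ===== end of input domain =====

-- B replaces A's single incremental accumulator pass by a direct minimum of
-- prefix-G + suffix-R counts over every split point (simpler, not faster).

-- ===== PORT A =====
-- the for-loop over i in range(len(row)) reading row[i] in order = structural
-- recursion over the character list, carrying (g, r, mn)
def minPaintsLoop : List Char → Int → Int → Int → Int
  | [], _, _, mn => mn
  | c :: t, g, r, mn =>
    let g' := if c = 'G' then g + 1 else g
    let r' := if c = 'R' then r - 1 else r
    minPaintsLoop t g' r' (min (g' + r') mn)

def minPaints (row : String) : Int :=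
  let cs := row.toList
  let r : Int := cs.count 'R'        -- row.count('R'): single-char str.count = list count (exact)
  let g : Int := (cs.length : Int) - r
  let mn := min g r
  minPaintsLoop cs 0 r mn

-- ===== PORT B =====
-- row[:k] / row[k:] with 0 ≤ k are take/drop; min(...) over the nonempty
-- range(len(row)+1) of values is PySem.List.min? (identity key)
def minPaints_alt (row : String) : Int :=
  let cs := row.toList
  let vals := (List.range (cs.length + 1)).map
    (fun k => ((cs.take k).count 'G' : Int) + ((cs.drop k).count 'R' : Int))
  (PySem.List.min? vals (fun x => x)).getD 0

-- ===== PRECONDITION & SPEC =====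
def Spec_minPaints (row : String) (out : Int) : Prop := out = minPaints_alt row
instance (row : String) (out : Int) : Decidable (Spec_minPaints row out) := by unfold Spec_minPaints; infer_instance

-- ===== CLAIM (what is proved, stated in full; the proofs are below) =====
def Claim_equal_minPaints : Prop := ∀ (row : String), Dom_minPaints row → Spec_minPaints row (minPaints row)

-- ===== LEMMAS AND PROOFS =====

-- split cost at k: G's in the prefix + R's in the suffix
def pvCost (cs : List Char) (k : Nat) : Int :=
  ((cs.take k).count 'G' : Int) + ((cs.drop k).count 'R' : Int)

theorem pvFoldlMinMin (L : List Int) : ∀ (a b : Int),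
    L.foldl min (min a b) = min a (L.foldl min b) := by
  induction L with
  | nil => intro a b; rfl
  | cons c t ih =>
    intro a b
    simp only [List.foldl_cons, min_assoc, ih]

theorem pvFoldlMinLeInit (L : List Int) : ∀ (b : Int), L.foldl min b ≤ b := by
  induction L with
  | nil => intro b; exact le_rfl
  | cons c t ih =>
    intro b
    exact le_trans (ih (min b c)) (min_le_left _ _)

theorem pvFoldlMinLeMem (L : List Int) (x : Int) (hx : x ∈ L) :
    ∀ (b : Int), L.foldl min b ≤ x := by
  induction L with
  | nil => cases hx
  | cons c t ih =>
    intro b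
    simp only [List.foldl_cons]
    rcases List.mem_cons.1 hx with h | h
    · subst h
      exact le_trans (pvFoldlMinLeInit t (min b x)) (min_le_right _ _)
    · exact ih h (min b c)

theorem pvCountGR_le (cs : List Char) :
    cs.count 'G' + cs.count 'R' ≤ cs.length := by
  induction cs with
  | nil => simp
  | cons c t ih =>
    simp only [List.count_cons, List.length_cons]
    by_cases h : c = 'G' <;> by_cases h' : c = 'R' <;>
      simp_all <;> omega

theorem pvLoopEq (s : List Char) : ∀ (g r mn : Int),
    minPaintsLoop s g r mn =
      ((List.range s.length).map
        (fun k => (g + ((s.take (k + 1)).count 'G' : Int)) +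
                  (r - ((s.take (k + 1)).count 'R' : Int)))).foldl min mn := by
  induction s with
  | nil => intro g r mn; rfl
  | cons c t ih =>
    intro g r mn
    have hr : List.range (t.length + 1) =
        0 :: (List.range t.length).map Nat.succ := List.range_succ_eq_map
    simp only [minPaintsLoop, List.length_cons, hr, List.map_cons, List.map_map,
      List.foldl_cons, ih]
    congr 1
    · -- the new head of the fold: min mn (cost of split after c) = min (g'+r') mn
      simp only [List.take_succ_cons, List.take_zero, List.count_cons, List.count_nil]
      by_cases h : c = 'G' <;> by_cases h' : c = 'R' <;>
        simp_all [min_comm]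
    · -- the mapped tails agree pointwise
      apply List.map_congr_left
      intro k _
      simp only [Function.comp_apply, List.take_succ_cons, List.count_cons]
      by_cases h : c = 'G' <;> by_cases h' : c = 'R' <;>
        simp_all <;> ring

theorem pvArmEqCost (cs : List Char) (k : Nat) :
    (0 + ((cs.take (k + 1)).count 'G' : Int)) +
      ((cs.count 'R' : Int) - ((cs.take (k + 1)).count 'R' : Int)) = pvCost cs (k + 1) := by
  have h : (cs.take (k + 1)).count 'R' + (cs.drop (k + 1)).count 'R' = cs.count 'R' := by
    conv_rhs => rw [← List.take_append_drop (k + 1) cs]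
    rw [List.count_append]
  unfold pvCost
  push_cast [← h]
  ring

theorem pvBothEq (cs : List Char) :
    minPaintsLoop cs 0 (cs.count 'R')
        (min ((cs.length : Int) - (cs.count 'R' : Int)) (cs.count 'R')) =
      (PySem.List.min? ((List.range (cs.length + 1)).map (fun k => pvCost cs k))
        (fun x => x)).getD 0 := by
  have hc0 : pvCost cs 0 = (cs.count 'R' : Int) := by simp [pvCost]
  have hr : List.range (cs.length + 1) =
      0 :: (List.range cs.length).map Nat.succ := List.range_succ_eq_map
  have hB : (PySem.List.min? ((List.range (cs.length + 1)).map (fun k => pvCost cs k))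
      (fun x => x)).getD 0 =
      ((List.range cs.length).map (fun k => pvCost cs (k + 1))).foldl min
        ((cs.count 'R' : Int)) := by
    rw [hr]
    simp only [List.map_cons, List.map_map, PySem.List.min?_id_cons, Option.getD_some,
      Function.comp_def, Nat.succ_eq_add_one, hc0]
  rw [hB, pvLoopEq]
  have harm : (List.range cs.length).map
      (fun k => (0 + ((cs.take (k + 1)).count 'G' : Int)) +
                ((cs.count 'R' : Int) - ((cs.take (k + 1)).count 'R' : Int))) =
      (List.range cs.length).map (fun k => pvCost cs (k + 1)) := by
    apply List.map_congr_left
    intro k _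
    exact pvArmEqCost cs k
  rw [harm, pvFoldlMinMin]
  -- kill the extra (len - r) term: the fold is ≤ pvCost cs cs.length = count G ≤ len - count R
  have hcn : pvCost cs cs.length = (cs.count 'G' : Int) := by
    simp [pvCost, List.take_length, List.drop_length]
  have hfold : ((List.range cs.length).map (fun k => pvCost cs (k + 1))).foldl min
      ((cs.count 'R' : Int)) ≤ pvCost cs cs.length := by
    rcases Nat.eq_zero_or_pos cs.length with h0 | hpos
    · rw [h0]
      simp [hc0.symm]
    · obtain ⟨m, hm⟩ : ∃ m, cs.length = m + 1 := ⟨cs.length - 1, by omega⟩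
      apply pvFoldlMinLeMem
      rw [hm]
      exact List.mem_map.2 ⟨m, List.mem_range.2 (Nat.lt_succ_self m), rfl⟩
  have hle : ((List.range cs.length).map (fun k => pvCost cs (k + 1))).foldl min
      ((cs.count 'R' : Int)) ≤ (cs.length : Int) - (cs.count 'R' : Int) := by
    have hGR := pvCountGR_le cs
    have : pvCost cs cs.length ≤ (cs.length : Int) - (cs.count 'R' : Int) := by
      rw [hcn]; omega
    exact le_trans hfold this
  exact min_eq_right hle

-- ===== VERDICT (by name: the statement is the Claim_ definition above) =====
theorem minPaints_spec : Claim_equal_minPaints := by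
  intro row _
  unfold Spec_minPaints minPaints minPaints_alt
  simpa [pvCost] using pvBothEq row.toList
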